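-- pv_equiv track=rewrite | github.com/saarjoye/MoviePilot-Plugins | plugins.v2/panlink115/client.py | _collapse_repeated_prefix
-- ===== SOURCE A (Python) =====
-- from typing import Any, Dict, Iterable, List, Optional, Tuple
--
-- def _collapse_repeated_prefix(parts: List[str]) -> List[str]:
--     items = list(parts or [])
--     while len(items) >= 2:
--         collapsed = False
--         max_prefix = len(items) // 2
--         for prefix_len in range(max_prefix, 0, -1):
--             if items[:prefix_len] == items[prefix_len : prefix_len * 2]:
--                 items = items[:prefix_len] + items[prefix_len * 2 :]
--                 collapsed = True
--                 break
--         if not collapsed: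
--             break
--     return items
-- ===== SOURCE B (Python) =====
-- from typing import List
--
--
-- def _z_array(items):
--     # Standard Z-algorithm: z[i] = length of the longest common prefix of
--     # items and items[i:], computed in O(n) with the [l, r) match window.
--     n = len(items)
--     z = [0] * n
--     l = r = 0
--     for i in range(1, n):
--         zi = min(r - i, z[i - l]) if i < r else 0
--         while i + zi < n and items[zi] == items[i + zi]:
--             zi += 1
--         z[i] = zi
--         if i + zi > r:
--             l, r = i, i + zi
--     return z
--
--
-- def _collapse_repeated_prefix(parts: List[str]) -> List[str]:
--     items = list(parts or [])
--     while len(items) >= 2: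
--         z = _z_array(items)
--         # items[:k] == items[k:2k]  iff  z[k] >= k; take the largest such k.
--         k = max((j for j in range(1, len(items) // 2 + 1) if z[j] >= j), default=0)
--         if k == 0:
--             break
--         items = items[:k] + items[2 * k:]
--     return items
-- ===== Notes on version B (the rewrite author's own statement) =====
-- stated objective: faster
-- what changed: Per pass, instead of slice-building and comparing items[:k] vs items[k:2k] for every candidate k (quadratic per pass), B computes the whole Z-array once with the standard l/r-window Z-algorithm in O(n) and reads off the largest k with z[k] >= k.
import Mathlib
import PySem

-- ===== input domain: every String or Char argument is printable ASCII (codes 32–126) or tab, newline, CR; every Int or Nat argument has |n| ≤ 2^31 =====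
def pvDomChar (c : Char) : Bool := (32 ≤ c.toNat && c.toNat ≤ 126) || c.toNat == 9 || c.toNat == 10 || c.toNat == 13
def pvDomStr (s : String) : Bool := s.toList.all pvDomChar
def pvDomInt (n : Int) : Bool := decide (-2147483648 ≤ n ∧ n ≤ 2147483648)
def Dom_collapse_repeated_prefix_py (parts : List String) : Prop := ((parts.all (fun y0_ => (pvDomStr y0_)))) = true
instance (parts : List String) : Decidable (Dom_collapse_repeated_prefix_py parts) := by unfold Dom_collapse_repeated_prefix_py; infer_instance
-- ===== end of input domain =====

-- B replaces A's per-pass search (slice-compare every candidate prefix length) by the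
-- Z-algorithm: one O(n) l/r-window pass computes all prefix-match lengths, then the
-- largest k with z[k] >= k is read off (objective: faster).

-- ===== PORT A =====
-- one body of A's while-loop: the inner 'for prefix_len in range(max_prefix, 0, -1)'
-- with its break is the first element of the countdown range passing the slice test
def pvAStep (items : List String) : Option (List String) :=
  match (PySem.List.pyRange (PySem.Int.floordiv (items.length : Int) 2) 0 (-1)).find?
      (fun k => PySem.List.slice items (some 0) (some k) ==
                PySem.List.slice items (some k) (some (k * 2))) with
  | some k => some (PySem.List.slice items (some 0) (some k) ++
                    PySem.List.slice items (some (k * 2)) none)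
  | none => none

-- A's while loop with a fuel guard for totality: each collapse removes at least one
-- element, so parts.length + 1 rounds always suffice (the fuel is never exhausted)
def pvAGo (fuel : Nat) (items : List String) : List String :=
  match fuel with
  | 0 => items
  | fuel + 1 =>
    if 2 ≤ items.length then
      match pvAStep items with
      | some items' => pvAGo fuel items'
      | none => items
    else items

def collapse_repeated_prefix_py (parts : List String) : List String :=
  pvAGo (parts.length + 1) parts

-- ===== PORT B =====
-- the Z-algorithm's extension 'while i + zi < n and items[zi] == items[i + zi]: zi += 1'
lemma pvLcp_dec {L i j : Nat} (h : i + j < L) : L - (i + (j + 1)) < L - (i + j) := by omega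

def pvLcpAux (items : List String) (i j : Nat) : Nat :=
  if _h : i + j < items.length then
    if items[j]? = items[i + j]? then pvLcpAux items i (j + 1) else j
  else j
termination_by items.length - (i + j)
decreasing_by exact pvLcp_dec _h

-- one body of the Z-algorithm's 'for i in range(1, n)' loop: state (l, r, z)
def pvZStep (items : List String) (st : Nat × Nat × List Nat) (i : Nat) : Nat × Nat × List Nat :=
  let z0 := if i < st.2.1 then min (st.2.1 - i) (st.2.2.getD (i - st.1) 0) else 0
  let zi := pvLcpAux items i z0
  let z' := st.2.2 ++ [zi]
  if st.2.1 < i + zi then (i, i + zi, z') else (st.1, st.2.1, z')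

-- _z_array: the initial z[0] = 0 is the seed literal; entries for i = 1 .. n-1 are appended
def pvZArr (items : List String) : List Nat :=
  ((List.range (items.length - 1)).foldl (fun st i0 => pvZStep items st (i0 + 1)) (0, 0, [0])).2.2

-- 'max((j for j in range(1, n//2+1) if z[j] >= j), default=0)': ascending fold keeping the last hit
def pvBMax (items : List String) : Nat :=
  (List.range (items.length / 2)).foldl
    (fun best j0 => if j0 + 1 ≤ (pvZArr items).getD (j0 + 1) 0 then j0 + 1 else best) 0

-- B's while loop, same fuel guard for totality (never exhausted for the same reason)
def pvBGo (fuel : Nat) (items : List String) : List String :=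
  match fuel with
  | 0 => items
  | fuel + 1 =>
    if 2 ≤ items.length then
      let k := pvBMax items
      if k = 0 then items
      else pvBGo fuel (items.take k ++ items.drop (2 * k))
    else items

def collapse_repeated_prefix_py_alt (parts : List String) : List String :=
  pvBGo (parts.length + 1) parts

-- ===== PRECONDITION & SPEC =====
def Spec_collapse_repeated_prefix_py (parts : List String) (out : List String) : Prop := out = collapse_repeated_prefix_py_alt parts
instance (parts : List String) (out : List String) : Decidable (Spec_collapse_repeated_prefix_py parts out) := by unfold Spec_collapse_repeated_prefix_py; infer_instance

-- ===== CLAIM (what is proved, stated in full; the proofs are below) =====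
def Claim_equal_collapse_repeated_prefix_py : Prop := ∀ (parts : List String), Dom_collapse_repeated_prefix_py parts → Spec_collapse_repeated_prefix_py parts (collapse_repeated_prefix_py parts)

-- ===== LEMMAS AND PROOFS =====

lemma pvFloordiv_two (n : Nat) : PySem.Int.floordiv (n : Int) 2 = ((n / 2 : Nat) : Int) := by
  exact_mod_cast PySem.Int.floordiv_natCast n 2

-- A's per-pass answer restated: the last k in 1..n//2 with lcp(items, items[k:]) >= k
def pvMaxSquare (items : List String) : Nat :=
  (List.range (items.length / 2)).foldl
    (fun best k0 => if k0 + 1 ≤ pvLcpAux items (k0 + 1) 0 then k0 + 1 else best) 0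

lemma pvLcpAux_self_le (items : List String) (i j : Nat) : j ≤ pvLcpAux items i j := by
  fun_induction pvLcpAux items i j with
  | case1 j h heq ih => omega
  | case2 j h heq => exact le_rfl
  | case3 j h => exact le_rfl

lemma pvLcpAux_ge_iff (items : List String) (i : Nat) (d : Nat) : ∀ (j : Nat),
    (j + d ≤ pvLcpAux items i j ↔
      ∀ t, t < d → i + (j + t) < items.length ∧ items[j + t]? = items[i + (j + t)]?) := by
  induction d with
  | zero =>
    intro j
    simp only [Nat.add_zero]
    constructor
    · intro _ t ht; omega
    · intro _; exact pvLcpAux_self_le items i j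
  | succ d ih =>
    intro j
    rw [pvLcpAux]
    split
    · rename_i h
      split
      · rename_i heq
        constructor
        · intro hle t ht
          rcases Nat.eq_zero_or_pos t with rfl | htpos
          · exact ⟨by omega, by simpa using heq⟩
          · have := (ih (j + 1)).mp (by omega) (t - 1) (by omega)
            constructor
            · omega
            · have e1 : j + 1 + (t - 1) = j + t := by omega
              have e2 : i + (j + 1 + (t - 1)) = i + (j + t) := by omega
              rw [e1] at this
              exact this.2
        · intro hall
          have : ∀ t, t < d → i + (j + 1 + t) < items.length ∧ items[j + 1 + t]? = items[i + (j + 1 + t)]? := by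
            intro t ht
            have := hall (t + 1) (by omega)
            have e1 : j + (t + 1) = j + 1 + t := by omega
            have e2 : i + (j + (t + 1)) = i + (j + 1 + t) := by omega
            rw [e1] at this
            exact this
          have := (ih (j + 1)).mpr this
          omega
      · rename_i hne
        constructor
        · intro hle; omega
        · intro hall
          exact absurd (hall 0 (by omega)).2 (by simpa using hne)
    · rename_i h
      constructor
      · intro hle; omega
      · intro hall
        have := (hall 0 (by omega)).1
        omega

-- every position below the computed lcp matches (and is in range)
lemma pvLcpAux_matches (items : List String) (i : Nat) : ∀ j t, j ≤ t → t < pvLcpAux items i j →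
    i + t < items.length ∧ items[t]? = items[i + t]? := by
  intro j t hjt hlt
  have := (pvLcpAux_ge_iff items i (t + 1 - j) j).mp (by omega) (t - j) (by omega)
  have e : j + (t - j) = t := by omega
  rw [e] at this
  exact this

-- the computed lcp is a stopping point: mismatch or end of list
lemma pvLcpAux_stop (items : List String) (i j : Nat) :
    ¬ (i + pvLcpAux items i j < items.length ∧
       items[pvLcpAux items i j]? = items[i + pvLcpAux items i j]?) := by
  fun_induction pvLcpAux items i j with
  | case1 j h heq ih => exact ih
  | case2 j h heq => intro hc; exact heq hc.2
  | case3 j h => intro hc; omega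

-- starting the extension anywhere at or below the true lcp lands on the true lcp
lemma pvLcpAux_eq_of_le (items : List String) (i : Nat) : ∀ j, j ≤ pvLcpAux items i 0 →
    pvLcpAux items i j = pvLcpAux items i 0 := by
  intro j
  fun_induction pvLcpAux items i j with
  | case1 j h heq ih =>
    intro hle
    apply ih
    rcases Nat.lt_or_ge j (pvLcpAux items i 0) with hlt | hge
    · omega
    · exfalso
      have hj : j = pvLcpAux items i 0 := by omega
      exact pvLcpAux_stop items i 0 (by rw [← hj]; exact ⟨h, heq⟩)
  | case2 j h heq =>
    intro hle
    rcases Nat.lt_or_ge j (pvLcpAux items i 0) with hlt | hge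
    · exact absurd (pvLcpAux_matches items i 0 j (by omega) hlt).2 heq
    · omega
  | case3 j h =>
    intro hle
    rcases Nat.lt_or_ge j (pvLcpAux items i 0) with hlt | hge
    · have := (pvLcpAux_matches items i 0 j (by omega) hlt).1
      omega
    · omega

-- invariant of the Z loop after the first m iterations
lemma pvZInv (items : List String) : ∀ m,
    ((List.range m).foldl (fun st i0 => pvZStep items st (i0 + 1)) (0, 0, [0])).2.2.length = m + 1 ∧
    (∀ j, 1 ≤ j → j ≤ m →
      ((List.range m).foldl (fun st i0 => pvZStep items st (i0 + 1)) (0, 0, [0])).2.2.getD j 0 =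
        pvLcpAux items j 0) ∧
    ((List.range m).foldl (fun st i0 => pvZStep items st (i0 + 1)) (0, 0, [0])).1 ≤ m ∧
    ((((List.range m).foldl (fun st i0 => pvZStep items st (i0 + 1)) (0, 0, [0])).1 = 0 ∧
      ((List.range m).foldl (fun st i0 => pvZStep items st (i0 + 1)) (0, 0, [0])).2.1 = 0) ∨
     (1 ≤ ((List.range m).foldl (fun st i0 => pvZStep items st (i0 + 1)) (0, 0, [0])).1 ∧
      ((List.range m).foldl (fun st i0 => pvZStep items st (i0 + 1)) (0, 0, [0])).2.1 =
        ((List.range m).foldl (fun st i0 => pvZStep items st (i0 + 1)) (0, 0, [0])).1 +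
          pvLcpAux items ((List.range m).foldl (fun st i0 => pvZStep items st (i0 + 1)) (0, 0, [0])).1 0)) := by
  intro m
  induction m with
  | zero => exact ⟨rfl, fun j h1 h2 => by omega, by simp, Or.inl ⟨rfl, rfl⟩⟩
  | succ m ih =>
    rw [List.range_succ, List.foldl_append, List.foldl_cons, List.foldl_nil]
    set st := (List.range m).foldl (fun st i0 => pvZStep items st (i0 + 1)) (0, 0, [0]) with hst
    obtain ⟨hlen, hz, hl, hlr⟩ := ih
    set i := m + 1 with hi
    -- the seed value z0 is at most the true lcp at i
    have hz0 : (if i < st.2.1 then min (st.2.1 - i) (st.2.2.getD (i - st.1) 0) else 0) ≤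
        pvLcpAux items i 0 := by
      split
      · rename_i hir
        rcases hlr with ⟨_, hr0⟩ | ⟨hl1, hr⟩
        · omega
        · set z0 := min (st.2.1 - i) (st.2.2.getD (i - st.1) 0) with hz0d
          have hil : i - st.1 ≤ m := by omega
          have hil1 : 1 ≤ i - st.1 := by omega
          have hzv : st.2.2.getD (i - st.1) 0 = pvLcpAux items (i - st.1) 0 := hz _ hil1 hil
          have : ∀ t, t < z0 → i + (0 + t) < items.length ∧ items[0 + t]? = items[i + (0 + t)]? := by
            intro t ht
            have ht1 : t < pvLcpAux items (i - st.1) 0 := by omega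
            have hm1 := pvLcpAux_matches items (i - st.1) 0 t (by omega) ht1
            -- window: position (i - st.1) + t < pvLcpAux items st.1 0
            have hwlt : (i - st.1) + t < pvLcpAux items st.1 0 := by omega
            have hm2 := pvLcpAux_matches items st.1 0 ((i - st.1) + t) (by omega) hwlt
            have e1 : st.1 + ((i - st.1) + t) = i + t := by omega
            rw [e1] at hm2
            refine ⟨by omega, ?_⟩
            simp only [Nat.zero_add]
            rw [hm1.2, hm2.2]
          have := (pvLcpAux_ge_iff items i z0 0).mpr this
          omega
      · omega
    have hzi : pvLcpAux items i
        (if i < st.2.1 then min (st.2.1 - i) (st.2.2.getD (i - st.1) 0) else 0) =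
        pvLcpAux items i 0 := pvLcpAux_eq_of_le items i _ hz0
    unfold pvZStep
    simp only [hzi]
    set zi := pvLcpAux items i 0 with hzid
    have hgetD : ∀ j, j ≤ m → (st.2.2 ++ [zi]).getD j 0 = st.2.2.getD j 0 := by
      intro j hj
      simp only [List.getD, List.getElem?_append_left (by omega : j < st.2.2.length)]
    have hgetDi : (st.2.2 ++ [zi]).getD i 0 = zi := by
      simp only [List.getD]
      rw [List.getElem?_append_right (by omega : st.2.2.length ≤ i)]
      simp [hlen]
    have hznew : ∀ j, 1 ≤ j → j ≤ m + 1 → (st.2.2 ++ [zi]).getD j 0 = pvLcpAux items j 0 := by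
      intro j h1 h2
      rcases Nat.lt_or_ge j (m + 1) with hlt | hge
      · rw [hgetD j (by omega)]; exact hz j h1 (by omega)
      · have : j = i := by omega
        rw [this, hgetDi]
    split
    · rename_i hupd
      exact ⟨by simp [hlen], hznew, by omega, Or.inr ⟨by omega, rfl⟩⟩
    · rename_i hnoupd
      refine ⟨by simp [hlen], hznew, by omega, ?_⟩
      rcases hlr with h | h
      · exact Or.inl h
      · exact Or.inr h

lemma pvZArr_getD (items : List String) (j : Nat) (h1 : 1 ≤ j) (h2 : j < items.length) :
    (pvZArr items).getD j 0 = pvLcpAux items j 0 := by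
  unfold pvZArr
  exact (pvZInv items (items.length - 1)).2.1 j h1 (by omega)

lemma pvBMax_eq (items : List String) : pvBMax items = pvMaxSquare items := by
  unfold pvBMax pvMaxSquare
  apply PySem.List.foldl_congr_mem
  intro acc x hx
  rw [List.mem_range] at hx
  have hlen : x + 1 < items.length := by omega
  rw [pvZArr_getD items (x + 1) (by omega) hlen]

lemma pvFold_best_succ (p : Nat → Prop) [DecidablePred p] (m : Nat) :
    (List.range (m + 1)).foldl (fun best k0 => if p k0 then k0 + 1 else best) 0 =
      if p m then m + 1 else (List.range m).foldl (fun best k0 => if p k0 then k0 + 1 else best) 0 := by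
  rw [List.range_succ, List.foldl_append]
  rfl

lemma pvTest_bridge (items : List String) (k : Nat) (hk1 : 1 ≤ k) (hk2 : k ≤ items.length / 2) :
    (PySem.List.slice items (some 0) (some (k : Int)) =
        PySem.List.slice items (some (k : Int)) (some ((k : Int) * 2)) ↔
      k ≤ pvLcpAux items k 0) := by
  have e0 : PySem.List.slice items (some 0) (some (k : Int)) = items.take k := by
    rw [PySem.List.slice_zero_start, PySem.List.slice_to_natCast]
  have e2 : ((k : Int) * 2) = ((2 * k : Nat) : Int) := by push_cast; ring
  have e1 : PySem.List.slice items (some (k : Int)) (some ((k : Int) * 2)) =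
      (items.drop k).take k := by
    rw [e2, PySem.List.slice_natCast]
    congr 1
    omega
  rw [e0, e1]
  have hiff := pvLcpAux_ge_iff items k k 0
  simp only [Nat.zero_add] at hiff
  rw [hiff]
  constructor
  · intro heq t ht
    have h1 : (items.take k)[t]? = ((items.drop k).take k)[t]? := by rw [heq]
    rw [List.getElem?_take, List.getElem?_take, List.getElem?_drop] at h1
    simp only [ht, if_pos] at h1
    refine ⟨?_, h1⟩
    by_contra hbig
    rw [not_lt] at hbig
    have : items[k + t]? = none := by
      rw [List.getElem?_eq_none_iff]; omega
    rw [this] at h1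
    rw [List.getElem?_eq_none_iff] at h1
    omega
  · intro hall
    apply List.ext_getElem?
    intro t
    rw [List.getElem?_take, List.getElem?_take, List.getElem?_drop]
    by_cases ht : t < k
    · simp only [ht, if_pos]
      exact (hall t ht).2
    · simp [ht]

lemma pvFind_desc (items : List String) (m : Nat) (hm : m ≤ items.length / 2) :
    (PySem.List.pyRange (m : Int) 0 (-1)).find?
        (fun k => PySem.List.slice items (some 0) (some k) ==
                  PySem.List.slice items (some k) (some (k * 2))) =
      (if (List.range m).foldl
            (fun best k0 => if k0 + 1 ≤ pvLcpAux items (k0 + 1) 0 then k0 + 1 else best) 0 = 0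
        then none
        else some (((List.range m).foldl
            (fun best k0 => if k0 + 1 ≤ pvLcpAux items (k0 + 1) 0 then k0 + 1 else best) 0 : Nat) : Int)) := by
  induction m with
  | zero =>
    rw [PySem.List.pyRange_neg_one_eq_nil (by omega)]
    simp
  | succ m ih =>
    rw [PySem.List.pyRange_neg_one_cons (by exact_mod_cast Nat.succ_pos m)]
    have ecast : ((m + 1 : Nat) : Int) - 1 = (m : Nat) := by push_cast; ring
    rw [show (((m + 1 : Nat) : Int) - 1) = ((m : Nat) : Int) from ecast]
    rw [pvFold_best_succ (fun k0 => k0 + 1 ≤ pvLcpAux items (k0 + 1) 0) m]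
    by_cases hp : m + 1 ≤ pvLcpAux items (m + 1) 0
    · rw [List.find?_cons_of_pos]
      · simp [hp]
      · simp only [beq_iff_eq]
        exact (pvTest_bridge items (m + 1) (by omega) hm).mpr hp
    · rw [List.find?_cons_of_neg]
      · rw [ih (by omega)]
        simp [hp]
      · simp only [beq_iff_eq]
        intro hcontra
        exact hp ((pvTest_bridge items (m + 1) (by omega) hm).mp hcontra)

lemma pvStep_iff (items : List String) :
    pvAStep items = (if pvMaxSquare items = 0 then none
      else some (items.take (pvMaxSquare items) ++ items.drop (2 * pvMaxSquare items))) := by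
  unfold pvAStep
  rw [pvFloordiv_two, pvFind_desc items (items.length / 2) le_rfl]
  have hM : (List.range (items.length / 2)).foldl
      (fun best k0 => if k0 + 1 ≤ pvLcpAux items (k0 + 1) 0 then k0 + 1 else best) 0 =
      pvMaxSquare items := rfl
  rw [hM]
  by_cases hF : pvMaxSquare items = 0
  · simp [hF]
  · simp only [hF, if_false]
    congr 1
    rw [PySem.List.slice_zero_start, PySem.List.slice_to_natCast]
    have e2 : ((pvMaxSquare items : Nat) : Int) * 2 = ((2 * pvMaxSquare items : Nat) : Int) := by
      push_cast; ring
    rw [e2, PySem.List.slice_from_natCast]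

lemma pvGo_eq : ∀ (fuel : Nat) (items : List String), pvAGo fuel items = pvBGo fuel items := by
  intro fuel
  induction fuel with
  | zero => intro items; rfl
  | succ fuel ih =>
    intro items
    rw [pvAGo, pvBGo]
    by_cases h2 : 2 ≤ items.length
    · simp only [h2, if_pos]
      rw [pvStep_iff]
      by_cases hM : pvMaxSquare items = 0
      · simp [pvBMax_eq, hM]
      · simp only [pvBMax_eq, hM, if_false, ih]
    · simp [h2]

-- ===== VERDICT (by name: the statement is the Claim_ definition above) =====
theorem collapse_repeated_prefix_py_spec : Claim_equal_collapse_repeated_prefix_py := by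
  intro parts _
  unfold Spec_collapse_repeated_prefix_py
  unfold collapse_repeated_prefix_py collapse_repeated_prefix_py_alt
  exact pvGo_eq (parts.length + 1) parts
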